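-- pv_equiv track=rewrite | github.com/onehostcloud/cloud-init | cloudinit/distros/helpers.py | _chop_comment
-- ===== SOURCE A (Python) =====
-- def _chop_comment(text, comment_chars):
--     comment_locations = [text.find(c) for c in comment_chars]
--     comment_locations = [c for c in comment_locations if c != -1]
--     if not comment_locations:
--         return (text, '')
--     min_comment = min(comment_locations)
--     before_comment = text[0:min_comment]
--     comment = text[min_comment:]
--     return (before_comment, comment)
-- ===== SOURCE B (Python) =====
-- def _chop_comment(text, comment_chars):
--     for i in range(len(text)):
--         if any(text.startswith(c, i) for c in comment_chars):
--             return (text[:i], text[i:])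
--     return (text, '')
-- ===== Notes on version B (the rewrite author's own statement) =====
-- stated objective: simpler
-- what changed: B replaces A's k separate full text.find passes, filter and min() with a single left-to-right scan that returns at the first index where any comment token starts.
import Mathlib
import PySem

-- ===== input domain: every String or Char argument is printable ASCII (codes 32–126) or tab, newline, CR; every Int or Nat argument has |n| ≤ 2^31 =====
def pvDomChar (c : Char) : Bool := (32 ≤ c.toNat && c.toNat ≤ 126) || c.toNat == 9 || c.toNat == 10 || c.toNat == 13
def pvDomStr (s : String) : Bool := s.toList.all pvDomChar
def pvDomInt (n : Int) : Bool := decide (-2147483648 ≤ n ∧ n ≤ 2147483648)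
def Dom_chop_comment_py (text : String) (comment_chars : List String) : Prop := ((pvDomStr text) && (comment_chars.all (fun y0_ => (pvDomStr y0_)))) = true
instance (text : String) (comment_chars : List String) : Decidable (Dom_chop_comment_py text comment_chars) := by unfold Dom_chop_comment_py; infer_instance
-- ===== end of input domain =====

-- B replaces A's k separate text.find calls + min with one left-to-right scan
-- that stops at the first position where some comment token starts (objective: simpler single pass).

-- ===== PORT A =====
def chop_comment_py (text : String) (comment_chars : List String) : String × String :=
  let locs := comment_chars.map (fun c => PySem.Str.find text c)
  let locs := locs.filter (fun c => c ≠ -1)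
  match locs with
  | [] => (text, "")
  | h :: t =>
    let min_comment := t.foldl min h   -- min(comment_locations)
    let s := text.toList
    (String.ofList (PySem.List.slice s (some 0) (some min_comment)),
     String.ofList (PySem.List.slice s (some min_comment) none))

-- ===== PORT B =====
-- the for-loop over range(len(text)): return the first index i where some
-- comment token starts (text.startswith(c, i)), none if the loop falls through
def chopGo (s : List Char) (ccs : List (List Char)) (i : Nat) : Option Nat :=
  if _h : i < s.length then
    if ccs.any (fun c => PySem.Chars.startswith (s.drop i) c) then some i
    else chopGo s ccs (i + 1)
  else none
termination_by s.length - i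

def chop_comment_py_alt (text : String) (comment_chars : List String) : String × String :=
  let s := text.toList
  match chopGo s (comment_chars.map String.toList) 0 with
  | some i => (String.ofList (s.take i), String.ofList (s.drop i))
  | none => (text, "")

-- ===== PRECONDITION & SPEC =====
def Spec_chop_comment_py (text : String) (comment_chars : List String) (out : String × String) : Prop := out = chop_comment_py_alt text comment_chars
instance (text : String) (comment_chars : List String) (out : String × String) : Decidable (Spec_chop_comment_py text comment_chars out) := by unfold Spec_chop_comment_py; infer_instance

-- ===== CLAIM (what is proved, stated in full; the proofs are below) =====
def Claim_equal_chop_comment_py : Prop := ∀ (text : String) (comment_chars : List String), Dom_chop_comment_py text comment_chars → Spec_chop_comment_py text comment_chars (chop_comment_py text comment_chars)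


-- ===== LEMMAS AND PROOFS =====

-- "some comment token starts at position j of s"
def PAt (s : List Char) (ccs : List (List Char)) (j : Nat) : Prop :=
  ∃ c ∈ ccs, c <+: s.drop j

theorem pat_iff_any (s : List Char) (ccs : List (List Char)) (j : Nat) :
    (ccs.any (fun c => PySem.Chars.startswith (s.drop j) c)) = true ↔ PAt s ccs j := by
  simp [PAt, List.any_eq_true, PySem.Chars.startswith_iff]

theorem chopGo_none (s : List Char) (ccs : List (List Char)) (i : Nat)
    (h : ∀ j, i ≤ j → j < s.length → ¬ PAt s ccs j) : chopGo s ccs i = none := by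
  unfold chopGo
  split
  · next hlt =>
    rw [if_neg, chopGo_none s ccs (i+1) (fun j hj hjl => h j (by omega) hjl)]
    intro hx
    exact h i le_rfl hlt ((pat_iff_any s ccs i).mp hx)
  · rfl
termination_by s.length - i

theorem chopGo_some (s : List Char) (ccs : List (List Char)) (i j0 : Nat)
    (hij : i ≤ j0) (hlt : j0 < s.length) (hp : PAt s ccs j0)
    (hmin : ∀ k, k < j0 → ¬ PAt s ccs k) : chopGo s ccs i = some j0 := by
  unfold chopGo
  rw [dif_pos (by omega)]
  by_cases hi : i = j0
  · subst hi
    rw [if_pos ((pat_iff_any s ccs i).mpr hp)]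
  · rw [if_neg, chopGo_some s ccs (i+1) j0 (by omega) hlt hp hmin]
    intro hx
    exact hmin i (by omega) ((pat_iff_any s ccs i).mp hx)
termination_by s.length - i

-- a prefix of a suffix of s is an infix of s
theorem prefix_drop_infix {c s : List Char} {j : Nat} (h : c <+: s.drop j) : c <:+: s :=
  h.isInfix.trans (List.drop_suffix j s).isInfix

-- the find of an occurring token is nonnegative and first
theorem find_occ {c s : List Char} {j : Nat} (h : c <+: s.drop j) :
    0 ≤ PySem.Chars.find s c ∧ (PySem.Chars.find s c).toNat ≤ j := by
  have hnn : 0 ≤ PySem.Chars.find s c :=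
    (PySem.Chars.find_nonneg_iff s c).mpr (prefix_drop_infix h)
  refine ⟨hnn, ?_⟩
  by_contra hgt
  exact ((PySem.Chars.find_spec hnn).2 j (by omega)) h

theorem main_eq (text : String) (comment_chars : List String) :
    chop_comment_py text comment_chars = chop_comment_py_alt text comment_chars := by
  unfold chop_comment_py chop_comment_py_alt
  dsimp only
  have hfind : ∀ c : String, PySem.Str.find text c = PySem.Chars.find text.toList c.toList := by
    intro c; simp
  cases hL : (comment_chars.map (fun c => PySem.Str.find text c)).filter (fun c => c ≠ -1) with
  | nil =>
    -- no token occurs anywhere: every find is -1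
    have hnone : ∀ j, ¬ PAt text.toList (comment_chars.map String.toList) j := by
      intro j ⟨c, hc, hpre⟩
      obtain ⟨c0, hc0, rfl⟩ := List.mem_map.mp hc
      have hne : PySem.Str.find text c0 ≠ -1 := by
        rw [hfind]
        exact (PySem.Chars.find_ne_neg_one_iff _ _).mpr (prefix_drop_infix hpre)
      have hmem : PySem.Str.find text c0 ∈
          (comment_chars.map (fun c => PySem.Str.find text c)).filter (fun c => c ≠ -1) := by
        simp only [List.mem_filter, List.mem_map]
        exact ⟨⟨c0, hc0, rfl⟩, by simpa using hne⟩
      rw [hL] at hmem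
      exact absurd hmem (List.not_mem_nil)
    rw [chopGo_none _ _ 0 (fun j _ _ => hnone j)]
  | cons h t =>
    -- the filtered list is nonempty; its min is the first comment position
    have hmin? : PySem.List.min? (h :: t) (fun x => x) = some (t.foldl min h) :=
      PySem.List.min?_id_cons h t
    have hmem : t.foldl min h ∈ (h :: t) := PySem.List.min?_mem hmin?
    have hle : ∀ y ∈ (h :: t), t.foldl min h ≤ y := PySem.List.min?_isMin hmin?
    rw [← hL] at hmem hle
    set m := t.foldl min h with hm
    obtain ⟨hmapmem, hne⟩ := List.mem_filter.mp hmem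
    obtain ⟨c0, hc0, hfc0⟩ := List.mem_map.mp hmapmem
    have hne' : m ≠ -1 := by simpa using hne
    have hnn : 0 ≤ m := by
      have := PySem.Chars.neg_one_le_find text.toList c0.toList
      rw [hfind] at hfc0
      omega
    -- the token c0 occurs at position m.toNat
    have hpm : PAt text.toList (comment_chars.map String.toList) m.toNat := by
      refine ⟨c0.toList, List.mem_map.mpr ⟨c0, hc0, rfl⟩, ?_⟩
      have := (PySem.Chars.find_spec (s := text.toList) (sub := c0.toList) (by rw [hfind] at hfc0; omega)).1
      rw [hfind] at hfc0
      rwa [hfc0] at this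
    -- nothing occurs earlier
    have hminimal : ∀ k, k < m.toNat → ¬ PAt text.toList (comment_chars.map String.toList) k := by
      intro k hk ⟨c, hc, hpre⟩
      obtain ⟨c1, hc1, rfl⟩ := List.mem_map.mp hc
      obtain ⟨hnn1, hfirst⟩ := find_occ hpre
      have hmemf : PySem.Str.find text c1 ∈
          (comment_chars.map (fun c => PySem.Str.find text c)).filter (fun c => c ≠ -1) := by
        simp only [List.mem_filter, List.mem_map]
        refine ⟨⟨c1, hc1, rfl⟩, ?_⟩
        rw [hfind]; simp only [decide_eq_true_eq]
        omega
      have hlem : m ≤ PySem.Str.find text c1 := hle _ hmemf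
      rw [hfind] at hlem
      have : m.toNat ≤ (PySem.Chars.find text.toList c1.toList).toNat := Int.toNat_le_toNat hlem
      omega
    by_cases hlen : m.toNat < text.toList.length
    · rw [chopGo_some text.toList _ 0 m.toNat (Nat.zero_le _) hlen hpm hminimal]
      dsimp only
      rw [← hm, PySem.List.slice_toNat text.toList (le_refl (0:Int)) hnn,
        PySem.List.slice_from text.toList hnn]
      simp
    · rw [chopGo_none text.toList _ 0
        (fun j _ hj => hminimal j (by omega))]
      dsimp only
      rw [← hm, PySem.List.slice_toNat text.toList (le_refl (0:Int)) hnn,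
        PySem.List.slice_from text.toList hnn]
      have h1 : text.toList.take m.toNat = text.toList := List.take_of_length_le (by omega)
      have h2 : text.toList.drop m.toNat = [] := List.drop_eq_nil_of_le (by omega)
      simp [h1, h2]

-- ===== VERDICT (by name: the statement is the Claim_ definition above) =====
theorem chop_comment_py_spec : Claim_equal_chop_comment_py := by
  intro text comment_chars _
  unfold Spec_chop_comment_py
  exact main_eq text comment_chars
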